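-- pv_equiv track=rewrite | github.com/ArturLange/advent-of-code | 2020/day7.py | get_bags_inside
-- ===== SOURCE A (Python) =====
-- def get_bags_inside(bags_dict, bag_name: str):
--     if bags_dict.get(bag_name) is None:
--         return set()
--     result = set()
--     result |= bags_dict.get(bag_name).keys()
--     for bag_ in bags_dict[bag_name]:
--         result |= get_bags_inside(bags_dict, bag_)
--     return result
-- ===== SOURCE B (Python) =====
-- def get_bags_inside(bags_dict, bag_name: str):
--     # Memoized DFS: each bag's transitive content set is computed once and cached.
--     cache = {}
--
--     def closure(name):
--         cached = cache.get(name)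
--         if cached is not None:
--             return cached
--         children = bags_dict.get(name)
--         if children is None:
--             result = set()
--         else:
--             result = set(children.keys())
--             for child in children:
--                 result |= closure(child)
--         cache[name] = result
--         return result
--
--     return closure(bag_name)
-- ===== Notes on version B (the rewrite author's own statement) =====
-- stated objective: alternative
-- what changed: Replaced A's naive recursion, which re-traverses a shared sub-bag once per path to it, by a memoized DFS that computes each bag's transitive content set once and caches it; it trades a cache dict for the repeated subtree traversals.
import Mathlib
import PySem

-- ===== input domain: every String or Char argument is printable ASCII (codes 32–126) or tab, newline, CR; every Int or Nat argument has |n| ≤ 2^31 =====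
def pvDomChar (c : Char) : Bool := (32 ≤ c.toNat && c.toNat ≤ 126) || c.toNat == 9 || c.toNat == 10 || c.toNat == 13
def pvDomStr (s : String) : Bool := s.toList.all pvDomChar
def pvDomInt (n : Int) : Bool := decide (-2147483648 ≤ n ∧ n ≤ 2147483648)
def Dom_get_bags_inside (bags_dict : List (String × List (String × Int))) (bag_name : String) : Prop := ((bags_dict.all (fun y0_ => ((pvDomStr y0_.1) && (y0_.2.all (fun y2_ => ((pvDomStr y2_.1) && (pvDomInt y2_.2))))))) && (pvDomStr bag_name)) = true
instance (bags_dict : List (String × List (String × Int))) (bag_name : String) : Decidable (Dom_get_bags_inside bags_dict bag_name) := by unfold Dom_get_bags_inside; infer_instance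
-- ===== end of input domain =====

-- B replaces A's naive re-traversing recursion by a memoized DFS that caches each bag's
-- transitive content set (objective: alternative; it trades a cache dict for the repeated
-- subtree traversals). Equivalence is proved on the inputs where the Python A returns
-- (Pre_): on a cycle reachable from bag_name A's recursion does not terminate.

-- ===== PORT A =====
-- fuel (pvFuel) only makes the recursion total in Lean; Pre_ guarantees it never runs out.
def pvFuel (bags_dict : List (String × List (String × Int))) : Nat :=
  (bags_dict.flatMap (fun p => p.2.map Prod.fst)).length + 1

def pvGetA (d : PySem.Dict String (List (String × Int))) : Nat → String → PySem.Set String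
  | 0, _ => []                                      -- fuel exhausted (unreachable under Pre_)
  | fuel+1, name =>
    match PySem.Dict.get? d name with
    | none => []                                    -- if bags_dict.get(bag_name) is None: return set()
    | some ch =>
      -- result = set(); result |= bags_dict.get(bag_name).keys()
      let result : PySem.Set String := PySem.Set.union PySem.Set.empty (ch.map Prod.fst)
      -- for bag_ in bags_dict[bag_name]: result |= get_bags_inside(bags_dict, bag_)
      (ch.map Prod.fst).foldl (fun r b => PySem.Set.union r (pvGetA d fuel b)) result

def get_bags_inside (bags_dict : List (String × List (String × Int))) (bag_name : String) : List String :=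
  pvGetA (PySem.Dict.mk bags_dict) (pvFuel bags_dict) bag_name

-- ===== PORT B =====
-- memoized DFS: the cache is threaded through the recursion; each bag is expanded once.
def pvGetB (d : PySem.Dict String (List (String × Int))) :
    Nat → String → PySem.Dict String (PySem.Set String) →
    PySem.Set String × PySem.Dict String (PySem.Set String)
  | 0, _, cache => ([], cache)                      -- fuel exhausted (unreachable under Pre_)
  | fuel+1, name, cache =>
    match PySem.Dict.get? cache name with
    | some s => (s, cache)                          -- cached = cache.get(name); if cached is not None: return cached
    | none =>
      match PySem.Dict.get? d name with
      | none => ([], PySem.Dict.insert cache name [])    -- result = set(); cache[name] = result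
      | some ch =>
        -- result = set(children.keys()); for child in children: result |= closure(child)
        let res := (ch.map Prod.fst).foldl
          (fun (p : PySem.Set String × PySem.Dict String (PySem.Set String)) b =>
            let q := pvGetB d fuel b p.2
            (PySem.Set.union p.1 q.1, q.2))
          (PySem.Set.ofList (ch.map Prod.fst), cache)
        (res.1, PySem.Dict.insert res.2 name res.1)      -- cache[name] = result

def get_bags_inside_alt (bags_dict : List (String × List (String × Int))) (bag_name : String) : List String :=
  (pvGetB (PySem.Dict.mk bags_dict) (pvFuel bags_dict) bag_name PySem.Dict.empty).1

-- ===== PRECONDITION & SPEC =====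
-- the children (direct contents) of bag u, as listed in the dict
def pvChildren (bags_dict : List (String × List (String × Int))) (u : String) : List String :=
  (((PySem.Dict.mk bags_dict).get? u).getD []).map Prod.fst

def pvStep (bags_dict : List (String × List (String × Int))) (S : PySem.Set String) : PySem.Set String :=
  PySem.Set.update S (S.flatMap (pvChildren bags_dict))

def pvReachN (bags_dict : List (String × List (String × Int))) : Nat → List String → PySem.Set String
  | 0, S => PySem.Set.ofList S
  | n+1, S => pvStep bags_dict (pvReachN bags_dict n S)

-- all bags transitively reachable from the bags in S (saturated transitive closure)
def pvReach (bags_dict : List (String × List (String × Int))) (S : List String) : PySem.Set String :=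
  pvReachN bags_dict (S.length + pvFuel bags_dict) S

-- Pre_ excludes exactly the inputs on which a cycle of bags is reachable from bag_name:
-- there the Python A recurses forever (RecursionError), returning nothing.
def Pre_get_bags_inside (bags_dict : List (String × List (String × Int))) (bag_name : String) : Prop :=
  ∀ u ∈ pvReach bags_dict [bag_name], u ∉ pvReach bags_dict (pvChildren bags_dict u)

instance (bags_dict : List (String × List (String × Int))) (bag_name : String) : Decidable (Pre_get_bags_inside bags_dict bag_name) := by
  unfold Pre_get_bags_inside; infer_instance

def pvWitness_get_bags_inside : (List (String × List (String × Int))) × String :=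
  ([("a", [("b", 2), ("c", 1)]), ("b", [("c", 3)]), ("c", [])], "a")

def Spec_get_bags_inside (bags_dict : List (String × List (String × Int))) (bag_name : String) (out : List String) : Prop := out = get_bags_inside_alt bags_dict bag_name
instance (bags_dict : List (String × List (String × Int))) (bag_name : String) (out : List String) : Decidable (Spec_get_bags_inside bags_dict bag_name out) := by unfold Spec_get_bags_inside; infer_instance

-- ===== CLAIM (what is proved, stated in full; the proofs are below) =====
def Claim_equal_get_bags_inside : Prop := ∀ (bags_dict : List (String × List (String × Int))) (bag_name : String), Dom_get_bags_inside bags_dict bag_name → Pre_get_bags_inside bags_dict bag_name → Spec_get_bags_inside bags_dict bag_name (get_bags_inside bags_dict bag_name)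

-- ===== LEMMAS AND PROOFS =====

-- all child names occurring anywhere in the dict (the "universe" of the closure computation)
def pvAllNames (bags_dict : List (String × List (String × Int))) : List String :=
  bags_dict.flatMap (fun p => p.2.map Prod.fst)

-- the one-step relation "bag v is directly inside bag u"
def pvEdge (bags_dict : List (String × List (String × Int))) (u v : String) : Prop :=
  v ∈ pvChildren bags_dict u

theorem pvFuel_succ (bs : List (String × List (String × Int))) :
    pvFuel bs = (pvAllNames bs).length + 1 := rfl

theorem pv_get?_mk_mem (bs : List (String × List (String × Int))) (u : String)
    (ch : List (String × Int)) (h : (PySem.Dict.mk bs).get? u = some ch) : (u, ch) ∈ bs := by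
  induction bs with
  | nil => simp [PySem.Dict.get?] at h
  | cons p rest ih =>
    obtain ⟨k, v⟩ := p
    rw [PySem.Dict.get?_mk_cons] at h
    by_cases hk : (k == u) = true
    · simp only [hk, if_true, Option.some.injEq] at h
      subst h
      simp [List.mem_cons, (beq_iff_eq ..).mp hk]
    · rw [if_neg hk] at h
      exact List.mem_cons_of_mem _ (ih h)

theorem pvChildren_subset_allNames (bs : List (String × List (String × Int)))
    (u v : String) (h : v ∈ pvChildren bs u) : v ∈ pvAllNames bs := by
  unfold pvChildren at h
  cases hget : (PySem.Dict.mk bs).get? u with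
  | none => rw [hget] at h; simp at h
  | some ch =>
    rw [hget] at h
    simp only [Option.getD_some] at h
    exact List.mem_flatMap.mpr ⟨(u, ch), pv_get?_mk_mem bs u ch hget, h⟩

theorem pv_mem_step (bs : List (String × List (String × Int))) (S : PySem.Set String)
    (y : String) : y ∈ pvStep bs S ↔ y ∈ S ∨ ∃ x ∈ S, y ∈ pvChildren bs x := by
  simp [pvStep, PySem.Set.mem_update, List.mem_flatMap]

theorem pv_nodup_reachN (bs : List (String × List (String × Int))) (n : Nat)
    (S : List String) : (pvReachN bs n S).Nodup := by
  induction n with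
  | zero => exact PySem.Set.nodup_ofList S
  | succ n ih => exact PySem.Set.nodup_update _ _ ih

theorem pv_reachN_universe (bs : List (String × List (String × Int))) (n : Nat)
    (S : List String) (y : String) (h : y ∈ pvReachN bs n S) :
    y ∈ S ∨ y ∈ pvAllNames bs := by
  induction n with
  | zero => exact Or.inl ((PySem.Set.mem_ofList S y).mp h)
  | succ n ih =>
    rcases (pv_mem_step bs _ y).mp h with h' | ⟨x, _, hxy⟩
    · exact ih h'
    · exact Or.inr (pvChildren_subset_allNames bs x y hxy)

theorem pv_step_cases (bs : List (String × List (String × Int))) (S : PySem.Set String) :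
    pvStep bs S = S ∨ S.length < (pvStep bs S).length := by
  unfold pvStep
  rw [PySem.Set.update_eq_append_filter]
  cases hT : List.filter (fun y => !S.contains y) (PySem.Set.ofList (S.flatMap (pvChildren bs))) with
  | nil => left; simp
  | cons a t => right; simp

theorem pv_reachN_growth (bs : List (String × List (String × Int))) (S : List String) :
    ∀ n : Nat, (∀ i, i < n → pvReachN bs (i+1) S ≠ pvReachN bs i S) →
    n ≤ (pvReachN bs n S).length := by
  intro n
  induction n with
  | zero => intro _; exact Nat.zero_le _
  | succ n ih =>
    intro h
    have h1 := ih (fun i hi => h i (Nat.lt_succ_of_lt hi))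
    have hne := h n (Nat.lt_succ_self n)
    have hstep : pvReachN bs (n+1) S = pvStep bs (pvReachN bs n S) := rfl
    rcases pv_step_cases bs (pvReachN bs n S) with heq | hlt
    · exact absurd (hstep.trans heq) hne
    · rw [hstep]; omega

theorem pv_reachN_length_le (bs : List (String × List (String × Int))) (n : Nat)
    (S : List String) : (pvReachN bs n S).length ≤ S.length + (pvAllNames bs).length := by
  have hnd := pv_nodup_reachN bs n S
  have hsub : (pvReachN bs n S).toFinset ⊆ (S ++ pvAllNames bs).toFinset := by
    intro y hy
    rw [List.mem_toFinset] at hy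
    rw [List.mem_toFinset, List.mem_append]
    exact pv_reachN_universe bs n S y hy
  calc (pvReachN bs n S).length = (pvReachN bs n S).toFinset.card :=
        (List.toFinset_card_of_nodup hnd).symm
    _ ≤ (S ++ pvAllNames bs).toFinset.card := Finset.card_le_card hsub
    _ ≤ (S ++ pvAllNames bs).length := List.toFinset_card_le _
    _ = S.length + (pvAllNames bs).length := List.length_append

theorem pv_ex_fix (bs : List (String × List (String × Int))) (S : List String) :
    ∃ i, i < S.length + pvFuel bs ∧ pvReachN bs (i+1) S = pvReachN bs i S := by
  by_contra hcon
  simp only [not_exists, not_and] at hcon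
  have hgrow := pv_reachN_growth bs S (S.length + pvFuel bs) hcon
  have hle := pv_reachN_length_le bs (S.length + pvFuel bs) S
  rw [pvFuel_succ] at hgrow hle
  omega

theorem pv_fix_forever (bs : List (String × List (String × Int))) (S : List String)
    (i : Nat) (hfix : pvReachN bs (i+1) S = pvReachN bs i S) :
    ∀ j, i ≤ j → pvReachN bs j S = pvReachN bs i S := by
  intro j hij
  induction j, hij using Nat.le_induction with
  | base => rfl
  | succ j hij ih =>
    have : pvReachN bs (j+1) S = pvStep bs (pvReachN bs j S) := rfl
    rw [this, ih]
    exact hfix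

theorem pv_reach_closed (bs : List (String × List (String × Int))) (S : List String)
    (y v : String) (hy : y ∈ pvReach bs S) (hv : v ∈ pvChildren bs y) :
    v ∈ pvReach bs S := by
  obtain ⟨i, hiN, hfix⟩ := pv_ex_fix bs S
  unfold pvReach at *
  have hN := pv_fix_forever bs S i hfix (S.length + pvFuel bs) (Nat.le_of_lt hiN)
  rw [hN] at hy ⊢
  rw [← hfix]
  exact (pv_mem_step bs _ v).mpr (Or.inr ⟨y, hy, hv⟩)

theorem pv_mem_reach_of_mem (bs : List (String × List (String × Int))) (S : List String)
    (y : String) (hy : y ∈ S) : y ∈ pvReach bs S := by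
  unfold pvReach
  generalize S.length + pvFuel bs = n
  induction n with
  | zero => exact (PySem.Set.mem_ofList S y).mpr hy
  | succ n ih => exact (pv_mem_step bs _ y).mpr (Or.inl ih)

theorem pv_reach_complete (bs : List (String × List (String × Int))) (S : List String)
    (y x : String) (hy : y ∈ S) (h : Relation.ReflTransGen (pvEdge bs) y x) :
    x ∈ pvReach bs S := by
  induction h with
  | refl => exact pv_mem_reach_of_mem bs S y hy
  | tail _ hbc ih => exact pv_reach_closed bs S _ _ ih hbc

theorem pv_reach_sound (bs : List (String × List (String × Int))) (S : List String)
    (x : String) (h : x ∈ pvReach bs S) :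
    ∃ s ∈ S, Relation.ReflTransGen (pvEdge bs) s x := by
  unfold pvReach at h
  generalize hn : S.length + pvFuel bs = n at h
  clear hn
  induction n generalizing x with
  | zero => exact ⟨x, (PySem.Set.mem_ofList S x).mp h, Relation.ReflTransGen.refl⟩
  | succ n ih =>
    rcases (pv_mem_step bs _ x).mp h with h' | ⟨y, hy, hxy⟩
    · exact ih x h'
    · obtain ⟨s, hs, hrtg⟩ := ih y hy
      exact ⟨s, hs, hrtg.tail (show pvEdge bs y x from hxy)⟩

theorem pv_mem_reach_singleton (bs : List (String × List (String × Int))) (u x : String) :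
    x ∈ pvReach bs [u] ↔ Relation.ReflTransGen (pvEdge bs) u x := by
  constructor
  · intro h
    obtain ⟨s, hs, hrtg⟩ := pv_reach_sound bs [u] x h
    simp only [List.mem_singleton] at hs
    exact hs ▸ hrtg
  · intro h
    exact pv_reach_complete bs [u] u x (List.mem_singleton_self u) h

-- the number of bags transitively reachable from u (including u): the recursion measure
def pvRank (bs : List (String × List (String × Int))) (u : String) : Nat :=
  (pvReach bs [u]).length

theorem pvRank_pos (bs : List (String × List (String × Int))) (u : String) :
    0 < pvRank bs u := by
  have hu : u ∈ pvReach bs [u] := pv_mem_reach_of_mem bs [u] u (List.mem_singleton_self u)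
  unfold pvRank
  cases hR : pvReach bs [u] with
  | nil => rw [hR] at hu; simp at hu
  | cons a t => simp

theorem pv_nodup_reach (bs : List (String × List (String × Int))) (S : List String) :
    (pvReach bs S).Nodup := pv_nodup_reachN bs _ S

theorem pvRank_le_fuel (bs : List (String × List (String × Int))) (u : String) :
    pvRank bs u ≤ pvFuel bs := by
  unfold pvRank pvReach
  have h := pv_reachN_length_le bs ([u].length + pvFuel bs) [u]
  have h2 : ([u] : List String).length + (pvAllNames bs).length ≤ pvFuel bs := by
    rw [pvFuel_succ]; simp
    omega
  exact le_trans h h2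

theorem pvRank_lt (bs : List (String × List (String × Int))) (bag u v : String)
    (pre : Pre_get_bags_inside bs bag)
    (hu : Relation.ReflTransGen (pvEdge bs) bag u) (hv : pvEdge bs u v) :
    pvRank bs v < pvRank bs u := by
  have hsub : (pvReach bs [v]).toFinset ⊆ (pvReach bs [u]).toFinset := by
    intro x hx
    rw [List.mem_toFinset] at hx ⊢
    have hrtg := (pv_mem_reach_singleton bs v x).mp hx
    exact (pv_mem_reach_singleton bs u x).mpr ((Relation.ReflTransGen.single hv).trans hrtg)
  have hu_in : u ∈ pvReach bs [u] := pv_mem_reach_of_mem bs [u] u (List.mem_singleton_self u)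
  have hu_not : u ∉ pvReach bs [v] := by
    intro hmem
    have hrtg : Relation.ReflTransGen (pvEdge bs) v u := (pv_mem_reach_singleton bs v u).mp hmem
    have : u ∈ pvReach bs (pvChildren bs u) := pv_reach_complete bs _ v u hv hrtg
    exact pre u ((pv_mem_reach_singleton bs bag u).mpr hu) this
  have hss : (pvReach bs [v]).toFinset ⊂ (pvReach bs [u]).toFinset := by
    refine ⟨hsub, fun hBA => hu_not ?_⟩
    have := hBA (List.mem_toFinset.mpr hu_in)
    exact List.mem_toFinset.mp this
  have hcard := Finset.card_lt_card hss
  unfold pvRank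
  rw [← List.toFinset_card_of_nodup (pv_nodup_reach bs [v]),
      ← List.toFinset_card_of_nodup (pv_nodup_reach bs [u])]
  exact hcard

theorem pvChildren_of_get? (bs : List (String × List (String × Int))) (u : String)
    (ch : List (String × Int)) (h : (PySem.Dict.mk bs).get? u = some ch) :
    pvChildren bs u = ch.map Prod.fst := by
  unfold pvChildren
  rw [h]
  rfl

theorem pvGetA_stable (bs : List (String × List (String × Int))) (bag : String)
    (pre : Pre_get_bags_inside bs bag) :
    ∀ (f : Nat) (g : Nat) (u : String), Relation.ReflTransGen (pvEdge bs) bag u →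
      pvRank bs u ≤ f → pvRank bs u ≤ g →
      pvGetA (PySem.Dict.mk bs) f u = pvGetA (PySem.Dict.mk bs) g u := by
  intro f
  induction f with
  | zero =>
    intro g u _ hf _
    have := pvRank_pos bs u
    omega
  | succ f ih =>
    intro g u hu hf hg
    have hpos := pvRank_pos bs u
    cases g with
    | zero => omega
    | succ g =>
      simp only [pvGetA]
      cases hch : (PySem.Dict.mk bs).get? u with
      | none => rfl
      | some ch =>
        apply PySem.List.foldl_congr_mem
        intro acc b hb
        have hedge : pvEdge bs u b := by
          rw [pvEdge, pvChildren_of_get? bs u ch hch]; exact hb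
        have hlt := pvRank_lt bs bag u b pre hu hedge
        rw [ih g b (hu.tail hedge) (by omega) (by omega)]

-- cache invariant of the memoized DFS: every cached set is the true (A-computed) closure
def pvGood (bs : List (String × List (String × Int))) (bag : String)
    (cache : PySem.Dict String (PySem.Set String)) : Prop :=
  ∀ k s, cache.get? k = some s →
    Relation.ReflTransGen (pvEdge bs) bag k ∧ s = pvGetA (PySem.Dict.mk bs) (pvFuel bs) k

theorem pvGood_insert (bs : List (String × List (String × Int))) (bag : String)
    (cache : PySem.Dict String (PySem.Set String)) (u : String) (r : PySem.Set String)
    (hg : pvGood bs bag cache) (hu : Relation.ReflTransGen (pvEdge bs) bag u)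
    (hr : r = pvGetA (PySem.Dict.mk bs) (pvFuel bs) u) :
    pvGood bs bag (cache.insert u r) := by
  intro k s hk
  rw [PySem.Dict.get?_insert] at hk
  by_cases hku : k = u
  · rw [if_pos hku] at hk
    cases hk
    exact ⟨hku ▸ hu, hku ▸ hr⟩
  · rw [if_neg hku] at hk
    exact hg k s hk

theorem pvFold_main (bs : List (String × List (String × Int))) (bag : String)
    (pre : Pre_get_bags_inside bs bag) (f : Nat) (u : String)
    (hu : Relation.ReflTransGen (pvEdge bs) bag u)
    (hrank : pvRank bs u ≤ f + 1)
    (IH : ∀ (u' : String) (cache : PySem.Dict String (PySem.Set String)),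
      Relation.ReflTransGen (pvEdge bs) bag u' → pvRank bs u' ≤ f → pvGood bs bag cache →
      (pvGetB (PySem.Dict.mk bs) f u' cache).1 = pvGetA (PySem.Dict.mk bs) (pvFuel bs) u' ∧
        pvGood bs bag (pvGetB (PySem.Dict.mk bs) f u' cache).2) :
    ∀ (l : List String), (∀ b ∈ l, pvEdge bs u b) →
    ∀ (acc : PySem.Set String) (cache : PySem.Dict String (PySem.Set String)),
      pvGood bs bag cache →
      (l.foldl (fun (p : PySem.Set String × PySem.Dict String (PySem.Set String)) b =>
          let q := pvGetB (PySem.Dict.mk bs) f b p.2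
          (PySem.Set.union p.1 q.1, q.2)) (acc, cache)).1 =
        l.foldl (fun a b => PySem.Set.union a (pvGetA (PySem.Dict.mk bs) (pvFuel bs) b)) acc ∧
      pvGood bs bag
        (l.foldl (fun (p : PySem.Set String × PySem.Dict String (PySem.Set String)) b =>
          let q := pvGetB (PySem.Dict.mk bs) f b p.2
          (PySem.Set.union p.1 q.1, q.2)) (acc, cache)).2 := by
  intro l
  induction l with
  | nil => intro _ acc cache hg; exact ⟨rfl, hg⟩
  | cons b l ihl =>
    intro hbl acc cache hg
    have hedge := hbl b (List.mem_cons_self ..)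
    have hub : Relation.ReflTransGen (pvEdge bs) bag b := hu.tail hedge
    have hrb : pvRank bs b ≤ f := by
      have := pvRank_lt bs bag u b pre hu hedge
      omega
    obtain ⟨h1, h2⟩ := IH b cache hub hrb hg
    simp only [List.foldl_cons]
    rw [show (let q := pvGetB (PySem.Dict.mk bs) f b (acc, cache).2
          (PySem.Set.union (acc, cache).1 q.1, q.2)) =
        (PySem.Set.union acc (pvGetA (PySem.Dict.mk bs) (pvFuel bs) b),
          (pvGetB (PySem.Dict.mk bs) f b cache).2) by rw [← h1]]
    exact ihl (fun x hx => hbl x (List.mem_cons_of_mem _ hx)) _ _ h2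

theorem pvGetB_main (bs : List (String × List (String × Int))) (bag : String)
    (pre : Pre_get_bags_inside bs bag) :
    ∀ (f : Nat) (u : String) (cache : PySem.Dict String (PySem.Set String)),
      Relation.ReflTransGen (pvEdge bs) bag u → pvRank bs u ≤ f → pvGood bs bag cache →
      (pvGetB (PySem.Dict.mk bs) f u cache).1 = pvGetA (PySem.Dict.mk bs) (pvFuel bs) u ∧
        pvGood bs bag (pvGetB (PySem.Dict.mk bs) f u cache).2 := by
  intro f
  induction f with
  | zero =>
    intro u cache _ hr _
    have := pvRank_pos bs u
    omega
  | succ f ih =>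
    intro u cache hu hrank hgood
    simp only [pvGetB]
    cases hc : PySem.Dict.get? cache u with
    | some s =>
      obtain ⟨_, hs⟩ := hgood u s hc
      exact ⟨hs, hgood⟩
    | none =>
      cases hch : (PySem.Dict.mk bs).get? u with
      | none =>
        have hA : pvGetA (PySem.Dict.mk bs) (pvFuel bs) u = [] := by
          rw [pvFuel_succ]
          simp only [pvGetA]
          rw [hch]
        refine ⟨hA.symm, ?_⟩
        exact pvGood_insert bs bag cache u [] hgood hu hA.symm
      | some ch =>
        have hedges : ∀ b ∈ ch.map Prod.fst, pvEdge bs u b := by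
          intro b hb
          rw [pvEdge, pvChildren_of_get? bs u ch hch]
          exact hb
        obtain ⟨h1, h2⟩ :=
          pvFold_main bs bag pre f u hu hrank ih (ch.map Prod.fst) hedges
            (PySem.Set.ofList (ch.map Prod.fst)) cache hgood
        have hA : pvGetA (PySem.Dict.mk bs) (pvFuel bs) u =
            (ch.map Prod.fst).foldl
              (fun a b => PySem.Set.union a (pvGetA (PySem.Dict.mk bs) (pvFuel bs) b))
              (PySem.Set.ofList (ch.map Prod.fst)) := by
          conv_lhs => rw [pvFuel_succ]
          simp only [pvGetA]
          rw [hch]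
          dsimp only
          have hbase : PySem.Set.union PySem.Set.empty (ch.map Prod.fst) =
              PySem.Set.ofList (ch.map Prod.fst) := by
            simp [PySem.Set.union, PySem.Set.update_nil_left, PySem.Set.empty]
          rw [hbase]
          apply PySem.List.foldl_congr_mem
          intro acc b hb
          have hedge := hedges b hb
          have hlt := pvRank_lt bs bag u b pre hu hedge
          have hle := pvRank_le_fuel bs u
          rw [pvGetA_stable bs bag pre (pvAllNames bs).length (pvFuel bs) b (hu.tail hedge)
            (by rw [pvFuel_succ] at hle; omega) (by omega)]
        refine ⟨?_, ?_⟩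
        · exact h1.trans hA.symm
        · exact pvGood_insert bs bag _ u _ h2 hu (h1.trans hA.symm)

theorem pvGood_empty (bs : List (String × List (String × Int))) (bag : String) :
    pvGood bs bag PySem.Dict.empty := by
  intro k s hk
  rw [PySem.Dict.get?_empty] at hk
  cases hk

-- ===== VERDICT (by name: the statement is the Claim_ definition above) =====
theorem get_bags_inside_spec : Claim_equal_get_bags_inside := by
  intro bs bag _ pre
  unfold Spec_get_bags_inside get_bags_inside get_bags_inside_alt
  have h := pvGetB_main bs bag pre (pvFuel bs) bag PySem.Dict.empty
    Relation.ReflTransGen.refl (pvRank_le_fuel bs bag) (pvGood_empty bs bag)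
  exact h.1.symm
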